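-- pv_equiv track=rewrite | github.com/vaneeek/GovTech-Data-Engineer-Assignment | src/transform/dimensions.py | _postal_region
-- ===== SOURCE A (Python) =====
-- def _postal_region(postal_code: str) -> str:
--     if not isinstance(postal_code, str) or len(postal_code) < 2:
--         return "Unknown"
--
--     try:
--         sector = int(postal_code[:2])
--     except ValueError:
--         return "Unknown"
--
--     district_ranges = {
--         1: [(1, 6)],
--         2: [(7, 8)],
--         3: [(14, 16)],
--         4: [(9, 10)],
--         5: [(11, 13)],
--         6: [(17, 17)],
--         7: [(18, 19)],
--         8: [(20, 21)],
--         9: [(22, 23)],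
--         10: [(24, 27)],
--         11: [(28, 30)],
--         12: [(31, 33)],
--         13: [(34, 37)],
--         14: [(38, 41)],
--         15: [(42, 45)],
--         16: [(46, 48)],
--         17: [(49, 50)],
--         18: [(51, 52)],
--         19: [(53, 55)],
--         20: [(56, 57)],
--         21: [(58, 59)],
--         22: [(60, 64)],
--         23: [(65, 68)],
--         24: [(69, 71)],
--         25: [(72, 73)],
--         26: [(77, 78)],
--         27: [(75, 76)],
--         28: [(79, 80), (81, 82)],
--     }
--
--     district = None
--     for d, ranges in district_ranges.items():
--         if any(start <= sector <= end for start, end in ranges):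
--             district = d
--             break
--
--     if district is None:
--         return "Unknown"
--
--     if 1 <= district <= 13:
--         return "Central"
--     if district in {14, 15, 16, 17, 18}:
--         return "East"
--     if district in {19, 20, 28}:
--         return "Northeast"
--     if district in {25, 26, 27}:
--         return "North"
--     if district in {21, 22, 23, 24}:
--         return "West"
--
--     return "Unknown"
-- ===== SOURCE B (Python) =====
-- _SECTOR_REGIONS = [
--     (1, 37, "Central"),
--     (38, 52, "East"),
--     (53, 57, "Northeast"),
--     (58, 71, "West"),
--     (72, 73, "North"),
--     (75, 78, "North"),
--     (79, 82, "Northeast"),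
-- ]
--
-- _REGION_BY_SECTOR = {
--     s: region for lo, hi, region in _SECTOR_REGIONS for s in range(lo, hi + 1)
-- }
--
--
-- def _postal_region(postal_code: str) -> str:
--     if not isinstance(postal_code, str) or len(postal_code) < 2:
--         return "Unknown"
--
--     try:
--         sector = int(postal_code[:2])
--     except ValueError:
--         return "Unknown"
--
--     return _REGION_BY_SECTOR.get(sector, "Unknown")
-- ===== Notes on version B (the rewrite author's own statement) =====
-- stated objective: simpler
-- what changed: Replaced the 28-entry district range-scan loop plus the district-to-region branch cascade with one precomputed flat sector-to-region dict built at module load, so each call is a single dict.get with the same default as before; the input guards are unchanged.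
import Mathlib
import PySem

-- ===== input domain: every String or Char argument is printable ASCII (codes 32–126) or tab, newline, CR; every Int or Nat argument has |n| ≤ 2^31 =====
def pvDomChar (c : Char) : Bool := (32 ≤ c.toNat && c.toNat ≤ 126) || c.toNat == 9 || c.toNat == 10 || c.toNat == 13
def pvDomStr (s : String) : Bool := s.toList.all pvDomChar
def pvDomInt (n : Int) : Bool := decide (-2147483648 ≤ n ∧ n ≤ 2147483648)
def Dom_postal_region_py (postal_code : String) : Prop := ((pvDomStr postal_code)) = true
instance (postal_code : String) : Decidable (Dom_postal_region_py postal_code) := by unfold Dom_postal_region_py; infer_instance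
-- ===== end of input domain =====

-- B replaces A's range-scan loop + district→region branch cascade by one precomputed sector→region dict lookup (simpler; same guards).


-- ===== PORT A =====
-- district_ranges literal, in insertion order
def districtRanges : List (Int × List (Int × Int)) :=
  [(1, [(1, 6)]), (2, [(7, 8)]), (3, [(14, 16)]), (4, [(9, 10)]), (5, [(11, 13)]),
   (6, [(17, 17)]), (7, [(18, 19)]), (8, [(20, 21)]), (9, [(22, 23)]), (10, [(24, 27)]),
   (11, [(28, 30)]), (12, [(31, 33)]), (13, [(34, 37)]), (14, [(38, 41)]), (15, [(42, 45)]),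
   (16, [(46, 48)]), (17, [(49, 50)]), (18, [(51, 52)]), (19, [(53, 55)]), (20, [(56, 57)]),
   (21, [(58, 59)]), (22, [(60, 64)]), (23, [(65, 68)]), (24, [(69, 71)]), (25, [(72, 73)]),
   (26, [(77, 78)]), (27, [(75, 76)]), (28, [(79, 80), (81, 82)])]

-- the 'for d, ranges … break' loop: first entry whose range list covers sector
def findDistrict (sector : Int) : List (Int × List (Int × Int)) → Option Int
  | [] => none
  | (d, ranges) :: rest =>
      if ranges.any (fun r => decide (r.1 ≤ sector ∧ sector ≤ r.2)) then some d
      else findDistrict sector rest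

def postal_region_py (postal_code : String) : String :=
  -- 'isinstance(postal_code, str)' is always true under the type convention
  if PySem.Str.len postal_code < 2 then "Unknown"
  else
    match PySem.Int.ofStr? (PySem.Str.slice postal_code none (some 2)) with
    | none => "Unknown"
    | some sector =>
        match findDistrict sector districtRanges with
        | none => "Unknown"
        | some district =>
            if 1 ≤ district ∧ district ≤ 13 then "Central"
            else if district = 14 ∨ district = 15 ∨ district = 16 ∨ district = 17 ∨ district = 18 then "East"
            else if district = 19 ∨ district = 20 ∨ district = 28 then "Northeast"
            else if district = 25 ∨ district = 26 ∨ district = 27 then "North"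
            else if district = 21 ∨ district = 22 ∨ district = 23 ∨ district = 24 then "West"
            else "Unknown"

-- ===== PORT B =====
def sectorRegions : List (Int × Int × String) :=
  [(1, 37, "Central"), (38, 52, "East"), (53, 57, "Northeast"), (58, 71, "West"),
   (72, 73, "North"), (75, 78, "North"), (79, 82, "Northeast")]

-- the dict comprehension {s: region for lo, hi, region in _SECTOR_REGIONS for s in range(lo, hi+1)}
def regionBySector : PySem.Dict Int String :=
  sectorRegions.foldl
    (fun d e => (PySem.List.pyRange e.1 (e.2.1 + 1) 1).foldl (fun d s => d.insert s e.2.2) d)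
    PySem.Dict.empty

def postal_region_py_alt (postal_code : String) : String :=
  if PySem.Str.len postal_code < 2 then "Unknown"
  else
    match PySem.Int.ofStr? (PySem.Str.slice postal_code none (some 2)) with
    | none => "Unknown"
    | some sector => regionBySector.getD sector "Unknown"

-- ===== PRECONDITION & SPEC =====
def Spec_postal_region_py (postal_code : String) (out : String) : Prop := out = postal_region_py_alt postal_code
instance (postal_code : String) (out : String) : Decidable (Spec_postal_region_py postal_code out) := by unfold Spec_postal_region_py; infer_instance

-- ===== CLAIM (what is proved, stated in full; the proofs are below) =====
def Claim_equal_postal_region_py : Prop := ∀ (postal_code : String), Dom_postal_region_py postal_code → Spec_postal_region_py postal_code (postal_region_py postal_code)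

-- ===== LEMMAS AND PROOFS =====

theorem findDistrict_eq_none (s : Int) (l : List (Int × List (Int × Int)))
    (h : ∀ e ∈ l, e.2.any (fun r => decide (r.1 ≤ s ∧ s ≤ r.2)) = false) :
    findDistrict s l = none := by
  induction l with
  | nil => rfl
  | cons e rest ih =>
      obtain ⟨d, ranges⟩ := e
      have hc := h (d, ranges) List.mem_cons_self
      rw [findDistrict]
      simp only [hc, Bool.false_eq_true, if_false]
      exact ih fun e' he' => h e' (List.mem_cons_of_mem _ he')

theorem getD_foldl_insert_not_mem (s : Int) (u r : String) (l : List Int)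
    (d : PySem.Dict Int String) (h : s ∉ l) :
    (l.foldl (fun d x => d.insert x r) d).getD s u = d.getD s u := by
  induction l generalizing d with
  | nil => rfl
  | cons a t ih =>
      simp only [List.mem_cons, not_or] at h
      rw [List.foldl_cons, ih _ h.2, PySem.Dict.getD_insert_of_ne _ _ _ h.1]

theorem out_of_range (s : Int) (h : s < 1 ∨ 82 < s) :
    (match findDistrict s districtRanges with
     | none => "Unknown"
     | some district =>
         if 1 ≤ district ∧ district ≤ 13 then "Central"
         else if district = 14 ∨ district = 15 ∨ district = 16 ∨ district = 17 ∨ district = 18 then "East"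
         else if district = 19 ∨ district = 20 ∨ district = 28 then "Northeast"
         else if district = 25 ∨ district = 26 ∨ district = 27 then "North"
         else if district = 21 ∨ district = 22 ∨ district = 23 ∨ district = 24 then "West"
         else "Unknown") = regionBySector.getD s "Unknown" := by
  rw [findDistrict_eq_none s districtRanges ?_]
  · rw [show regionBySector.getD s "Unknown" = "Unknown" from ?_]
    unfold regionBySector sectorRegions
    simp only [List.foldl_cons, List.foldl_nil]
    rw [getD_foldl_insert_not_mem, getD_foldl_insert_not_mem, getD_foldl_insert_not_mem,
        getD_foldl_insert_not_mem, getD_foldl_insert_not_mem, getD_foldl_insert_not_mem,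
        getD_foldl_insert_not_mem]
    · rfl
    all_goals simp only [PySem.List.mem_pyRange_one]; omega
  · intro e he
    unfold districtRanges at he
    fin_cases he <;> simp <;> omega

set_option maxRecDepth 40000 in
theorem core_eq (s : Int) :
    (match findDistrict s districtRanges with
     | none => "Unknown"
     | some district =>
         if 1 ≤ district ∧ district ≤ 13 then "Central"
         else if district = 14 ∨ district = 15 ∨ district = 16 ∨ district = 17 ∨ district = 18 then "East"
         else if district = 19 ∨ district = 20 ∨ district = 28 then "Northeast"
         else if district = 25 ∨ district = 26 ∨ district = 27 then "North"
         else if district = 21 ∨ district = 22 ∨ district = 23 ∨ district = 24 then "West"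
         else "Unknown") = regionBySector.getD s "Unknown" := by
  by_cases h : 1 ≤ s ∧ s ≤ 82
  · obtain ⟨h1, h2⟩ := h
    interval_cases s <;> decide
  · exact out_of_range s (by omega)

-- ===== VERDICT (by name: the statement is the Claim_ definition above) =====
theorem postal_region_py_spec : Claim_equal_postal_region_py := by
  intro pc _
  unfold Spec_postal_region_py postal_region_py postal_region_py_alt
  split_ifs with h
  · rfl
  · cases PySem.Int.ofStr? (PySem.Str.slice pc none (some 2)) with
    | none => rfl
    | some sector => exact core_eq sector
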